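-- pv_equiv track=rewrite | github.com/ranai-srivastav/MultiAgent_TaskPlanning_RobustExecution | single_agent_planner.py | is_valid_motion
-- ===== SOURCE A (Python) =====
-- def is_valid_motion(old_loc, new_loc):
--     ##############################
--     # Check if a move from old_loc to new_loc is valid
--     # Check if two agents are in the same location (vertex collision)
--     new_set = {loc: idx for idx, loc in enumerate(new_loc)}
--     if len(new_set) != len(new_loc):
--         return False
--
--     # Check edge collision
--     for old_idx, old in enumerate(old_loc):
--         if (old in new_set):
--             new_idx = new_set[old]
--             prev_loc_a = old
--             curr_loc_a = new_loc[old_idx]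
--             prev_loc_b = old_loc[new_idx]
--             curr_loc_b = new_loc[new_idx]
--
--             if (old_idx != new_idx and
--                     prev_loc_a == curr_loc_b and
--                     prev_loc_b == curr_loc_a):
--                 return False
--
--     return True
-- ===== SOURCE B (Python) =====
-- def is_valid_motion(old_loc, new_loc):
--     # Vertex collision: brute-force pairwise comparison of final positions.
--     n = len(new_loc)
--     for i in range(n):
--         for j in range(i + 1, n):
--             if new_loc[i] == new_loc[j]:
--                 return False
--     # Swap (edge) collision: brute-force pairwise check for a crossed pair;
--     # a swap involves two positions present in both lists.
--     k = min(len(old_loc), len(new_loc))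
--     for i in range(k):
--         for j in range(i + 1, k):
--             if old_loc[i] == new_loc[j] and old_loc[j] == new_loc[i]:
--                 return False
--     return True
-- ===== Notes on version B (the rewrite author's own statement) =====
-- stated objective: alternative
-- what changed: Replaces A's hash-indexed single pass (a location-to-index dict with index arithmetic) by an index-free brute-force pairwise scan: compare every pair of final positions for a vertex collision, then every pair of agents for a crossed (swap) pair; correct because the swap predicate is symmetric in the two agents.
-- outside the precondition, e.g. on is_valid_motion([(1, 1), (2, 2)], [(2, 2), (1, 1), (2, 2)]): A returns False, B returns False
import Mathlib
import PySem

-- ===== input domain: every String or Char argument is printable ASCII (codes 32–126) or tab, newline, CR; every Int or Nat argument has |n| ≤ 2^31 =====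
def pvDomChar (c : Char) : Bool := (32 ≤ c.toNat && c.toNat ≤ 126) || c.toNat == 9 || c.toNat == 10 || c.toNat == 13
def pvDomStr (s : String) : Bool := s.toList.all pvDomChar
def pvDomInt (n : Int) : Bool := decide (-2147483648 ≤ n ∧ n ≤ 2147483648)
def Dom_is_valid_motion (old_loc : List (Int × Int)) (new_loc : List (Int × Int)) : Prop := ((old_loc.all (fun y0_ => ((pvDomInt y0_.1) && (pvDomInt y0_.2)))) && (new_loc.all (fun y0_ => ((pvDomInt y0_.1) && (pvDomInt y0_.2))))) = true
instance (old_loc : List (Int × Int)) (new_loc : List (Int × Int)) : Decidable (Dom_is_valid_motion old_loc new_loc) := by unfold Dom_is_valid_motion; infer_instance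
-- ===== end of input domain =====

-- B replaces A's location→index dict and index arithmetic by an index-free brute-force
-- pairwise scan over all pairs of agents (objective: alternative; B is O(n²) where A is O(n)).

-- ===== PORT A =====
-- new_set = {loc: idx for idx, loc in enumerate(new_loc)}
def aDict (new_loc : List (Int × Int)) : PySem.Dict (Int × Int) Int :=
  (PySem.List.enumerate new_loc).foldl (fun d p => d.insert p.2 p.1) PySem.Dict.empty

-- the 'for old_idx, old in enumerate(old_loc)' loop with its early 'return False';
-- the catch-all 'false' arm is Python's IndexError (those inputs lie outside Pre_)
def aLoop (old_loc new_loc : List (Int × Int)) (d : PySem.Dict (Int × Int) Int) :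
    List (Int × (Int × Int)) → Bool
  | [] => true
  | (old_idx, old) :: rest =>
    match d.get? old with
    | none => aLoop old_loc new_loc d rest
    | some new_idx =>
      match PySem.List.pyGet? new_loc old_idx, PySem.List.pyGet? old_loc new_idx,
            PySem.List.pyGet? new_loc new_idx with
      | some curr_loc_a, some prev_loc_b, some curr_loc_b =>
        if old_idx ≠ new_idx ∧ old = curr_loc_b ∧ prev_loc_b = curr_loc_a then false
        else aLoop old_loc new_loc d rest
      | _, _, _ => false

def is_valid_motion (old_loc : List (Int × Int)) (new_loc : List (Int × Int)) : Bool :=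
  let new_set := aDict new_loc
  if new_set.size ≠ (new_loc.length : Int) then false
  else aLoop old_loc new_loc new_set (PySem.List.enumerate old_loc)

-- ===== PORT B =====
-- the nested 'for i in range(n): for j in range(i+1, n): if f(i,j): return False' shape
def bPairHit (f : Nat → Nat → Bool) (n : Nat) : Bool :=
  (List.range n).any (fun i => (List.range' (i + 1) (n - (i + 1))).any (fun j => f i j))

-- indices produced by bPairHit are always in range, so getD's default is never read
def is_valid_motion_alt (old_loc : List (Int × Int)) (new_loc : List (Int × Int)) : Bool :=
  let n := new_loc.length
  if bPairHit (fun i j => new_loc.getD i (0, 0) == new_loc.getD j (0, 0)) n then false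
  else
    let k := min old_loc.length new_loc.length
    if bPairHit (fun i j => old_loc.getD i (0, 0) == new_loc.getD j (0, 0) &&
                            old_loc.getD j (0, 0) == new_loc.getD i (0, 0)) k then false
    else true

-- ===== PRECONDITION & SPEC =====
-- Pre_ excludes inputs where some old position occurs among the new positions at an
-- out-of-range index for A's edge check (old_idx ≥ len(new_loc) or new_idx ≥ len(old_loc)):
-- there A's indexing raises IndexError, unless an earlier collision returns False first.
def Pre_is_valid_motion (old_loc : List (Int × Int)) (new_loc : List (Int × Int)) : Prop :=
  ∀ (i : Nat) (hi : i < old_loc.length), old_loc[i] ∈ new_loc →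
    (i < new_loc.length ∧
      ∀ (j : Nat) (hj : j < new_loc.length), new_loc[j] = old_loc[i] → j < old_loc.length)
instance (old_loc : List (Int × Int)) (new_loc : List (Int × Int)) : Decidable (Pre_is_valid_motion old_loc new_loc) := by unfold Pre_is_valid_motion; infer_instance

def pvWitness_is_valid_motion : (List (Int × Int)) × (List (Int × Int)) :=
  ([(0, 0), (1, 1)], [(0, 1), (1, 1)])

def Spec_is_valid_motion (old_loc : List (Int × Int)) (new_loc : List (Int × Int)) (out : Bool) : Prop := out = is_valid_motion_alt old_loc new_loc
instance (old_loc : List (Int × Int)) (new_loc : List (Int × Int)) (out : Bool) : Decidable (Spec_is_valid_motion old_loc new_loc out) := by unfold Spec_is_valid_motion; infer_instance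

-- ===== CLAIM (what is proved, stated in full; the proofs are below) =====
def Claim_equal_is_valid_motion : Prop := ∀ (old_loc : List (Int × Int)) (new_loc : List (Int × Int)), Dom_is_valid_motion old_loc new_loc → Pre_is_valid_motion old_loc new_loc → Spec_is_valid_motion old_loc new_loc (is_valid_motion old_loc new_loc)

-- ===== LEMMAS AND PROOFS =====

theorem aDict_keys (new_loc : List (Int × Int)) :
    (aDict new_loc).keys = PySem.Set.ofList new_loc := by
  have h1 := PySem.Dict.keys_foldl_insert_key (ν := Int) (PySem.List.enumerate new_loc)
    (fun p => p.2) (fun _ p => p.1) PySem.Dict.empty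
  simp only [PySem.List.map_snd_enumerate, PySem.Dict.keys_empty, PySem.Set.update_nil_left] at h1
  exact h1

theorem aDict_size (new_loc : List (Int × Int)) :
    (aDict new_loc).size = ((PySem.Set.ofList new_loc).length : Int) := by
  have h := aDict_keys new_loc
  have : (aDict new_loc).keys.length = (PySem.Set.ofList new_loc).length := by rw [h]
  simp [PySem.Dict.keys, PySem.Dict.size] at this ⊢
  omega

theorem aDict_nodup_keys (new_loc : List (Int × Int)) : (aDict new_loc).keys.Nodup := by
  exact PySem.Dict.nodup_keys_foldl_insert_key (PySem.List.enumerate new_loc)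
    (fun p => p.2) (fun _ p => p.1) PySem.Dict.empty PySem.Dict.nodup_keys_empty

theorem aDict_items (new_loc : List (Int × Int)) (hn : new_loc.Nodup) :
    (aDict new_loc).items = (PySem.List.enumerate new_loc).map (fun p => (p.2, p.1)) := by
  have h1 := PySem.Dict.items_foldl_insert_fresh (PySem.List.enumerate new_loc)
    (fun p => p.2) (fun p => p.1) PySem.Dict.empty
    (fun a _ => PySem.Dict.contains_empty _) (by simpa [PySem.List.map_snd_enumerate])
  simpa using h1

theorem aDict_get (new_loc : List (Int × Int)) (hn : new_loc.Nodup) (x : Int × Int) (j : Int) :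
    (aDict new_loc).get? x = some j ↔
      ∃ (k : Nat) (h : k < new_loc.length), j = (k : Int) ∧ new_loc[k] = x := by
  rw [PySem.Dict.get?_eq_some_iff_mem_items _ _ _ (aDict_nodup_keys new_loc),
      aDict_items new_loc hn]
  simp only [List.mem_map, PySem.List.mem_enumerate_iff]
  constructor
  · rintro ⟨p, ⟨k, h, rfl⟩, hp⟩
    exact ⟨k, h, by simpa using congrArg Prod.snd hp.symm, by simpa using congrArg Prod.fst hp⟩
  · rintro ⟨k, h, rfl, rfl⟩
    exact ⟨((k : Int), new_loc[k]), ⟨k, h, by simp⟩, rfl⟩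

theorem nodup_of_set_length (xs : List (Int × Int))
    (h : (PySem.Set.ofList xs).length = xs.length) : xs.Nodup := by
  induction xs using List.reverseRecOn with
  | nil => exact List.nodup_nil
  | append_singleton xs x ih =>
    have hof : PySem.Set.ofList (xs ++ [x]) = PySem.Set.add (PySem.Set.ofList xs) x := by
      simp [PySem.Set.ofList_eq_foldl, List.foldl_append, PySem.Set.add]
    rw [hof] at h
    unfold PySem.Set.add at h
    by_cases hc : (PySem.Set.ofList xs).contains x = true
    · rw [if_pos hc] at h
      have := PySem.Set.length_ofList_le xs
      simp at h; omega
    · rw [if_neg hc] at h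
      simp at h
      have hnd := ih h
      have hx : x ∉ xs := by
        intro hmem
        exact hc (by simpa [List.contains_iff_mem, PySem.Set.mem_ofList])
      rw [List.nodup_append]
      refine ⟨hnd, List.nodup_singleton _, fun a ha b hb => ?_⟩
      simp only [List.mem_singleton] at hb
      subst hb
      rintro rfl; exact hx ha

-- the pair that makes A's loop body return False at entry p
def TrigP (old_loc new_loc : List (Int × Int)) (p : Int × (Int × Int)) : Prop :=
  ∃ (i j : Nat) (hi : i < old_loc.length) (hj : j < new_loc.length)
    (hji : j < old_loc.length) (hin : i < new_loc.length),
    p = ((i : Int), old_loc[i]) ∧ new_loc[j] = old_loc[i] ∧ i ≠ j ∧ old_loc[j] = new_loc[i]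

theorem aLoop_iff (old_loc new_loc : List (Int × Int)) (hn : new_loc.Nodup)
    (hpre : Pre_is_valid_motion old_loc new_loc) :
    ∀ (l : List (Int × (Int × Int))),
      (∀ p ∈ l, ∃ (k : Nat) (hk : k < old_loc.length), p = ((k : Int), old_loc[k])) →
      (aLoop old_loc new_loc (aDict new_loc) l = true ↔ ∀ p ∈ l, ¬ TrigP old_loc new_loc p) := by
  intro l
  induction l with
  | nil => intro _; simp [aLoop]
  | cons p rest ih =>
    intro hmem
    obtain ⟨k, hk, hp⟩ := hmem _ (List.mem_cons_self)
    have hrest := ih (fun q hq => hmem q (List.mem_cons_of_mem _ hq))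
    subst hp
    rw [aLoop]
    cases hget : (aDict new_loc).get? old_loc[k] with
    | none =>
      have hnomem : old_loc[k] ∉ new_loc := by
        have := (PySem.Dict.get?_eq_none_iff_not_mem_keys _ _).mp hget
        rw [aDict_keys] at this
        simpa [PySem.Set.mem_ofList] using this
      rw [hrest]
      constructor
      · intro h q hq
        rcases List.mem_cons.mp hq with rfl | hq'
        · rintro ⟨i, j, hi, hj, hji, hin, heq, hnew, _, _⟩
          rw [Prod.mk.injEq] at heq
          have h2 : old_loc[k] = new_loc[j] := by rw [heq.2, ← hnew]
          exact hnomem (h2 ▸ List.getElem_mem hj)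
        · exact h q hq'
      · intro h q hq; exact h q (List.mem_cons_of_mem _ hq)
    | some new_idx =>
      obtain ⟨j, hj, hidx, hnewj⟩ := (aDict_get new_loc hn _ _).mp hget
      subst hidx
      have hmemk : old_loc[k] ∈ new_loc := hnewj ▸ List.getElem_mem hj
      have hkn : k < new_loc.length := (hpre k hk hmemk).1
      have hjo : j < old_loc.length := (hpre k hk hmemk).2 j hj hnewj
      split
      · rename_i heq; simp at heq
      · rename_i new_idx heq
        injection heq with heq'
        subst heq'
        rw [PySem.List.pyGet?_natCast, PySem.List.pyGet?_natCast, PySem.List.pyGet?_natCast,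
            List.getElem?_eq_getElem hkn, List.getElem?_eq_getElem hjo, List.getElem?_eq_getElem hj]
        split
        · rename_i curr_a prev_b curr_b ha hb hc
          injection ha with ha'; injection hb with hb'; injection hc with hc'
          subst ha'; subst hb'; subst hc'
          by_cases hcond : (k : Int) ≠ (j : Int) ∧ old_loc[k] = new_loc[j] ∧ old_loc[j] = new_loc[k]
          · rw [if_pos hcond]
            simp only [Bool.false_eq_true, false_iff, not_forall]
            refine ⟨((k : Int), old_loc[k]), ⟨List.mem_cons_self, ?_⟩⟩
            intro hnot
            exact hnot ⟨k, j, hk, hj, hjo, hkn, rfl, hnewj, by exact_mod_cast hcond.1, hcond.2.2⟩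
          · rw [if_neg hcond, hrest]
            constructor
            · intro h q hq
              rcases List.mem_cons.mp hq with rfl | hq'
              · rintro ⟨i, j', hi, hj', hji', hin, heq2, hnew', hij', hswap⟩
                rw [Prod.mk.injEq] at heq2
                have hik : k = i := by exact_mod_cast heq2.1
                subst hik
                have hjj : j' = j := by
                  have hee : new_loc[j'] = new_loc[j] := by rw [hnew', hnewj, ← heq2.2]
                  exact (List.Nodup.getElem_inj_iff hn).mp hee
                subst hjj
                refine hcond ⟨?_, hnewj.symm, hswap⟩
                exact_mod_cast hij'
              · exact h q hq'
            · intro h q hq; exact h q (List.mem_cons_of_mem _ hq)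
        · rename_i hcontra
          exact absurd (hcontra _ _ _ rfl rfl rfl) (fun h => h)

theorem bPairHit_iff (f : Nat → Nat → Bool) (n : Nat) :
    bPairHit f n = true ↔ ∃ i j, i < j ∧ j < n ∧ f i j = true := by
  simp only [bPairHit, List.any_eq_true, List.mem_range, List.mem_range'_1]
  constructor
  · rintro ⟨i, hi, j, ⟨h1, h2⟩, hf⟩
    exact ⟨i, j, by omega, by omega, hf⟩
  · rintro ⟨i, j, hij, hj, hf⟩
    exact ⟨i, by omega, j, ⟨by omega, by omega⟩, hf⟩

theorem bVertex_false_of_nodup (new_loc : List (Int × Int)) (hn : new_loc.Nodup) :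
    bPairHit (fun i j => new_loc.getD i (0, 0) == new_loc.getD j (0, 0)) new_loc.length = false := by
  rw [Bool.eq_false_iff]
  intro h
  obtain ⟨i, j, hij, hj, hf⟩ := (bPairHit_iff _ _).mp h
  have hi : i < new_loc.length := by omega
  rw [List.getD_eq_getElem _ _ hi, List.getD_eq_getElem _ _ hj, beq_iff_eq] at hf
  exact absurd ((List.Nodup.getElem_inj_iff hn).mp hf) (by omega)

theorem bVertex_true_of_not_nodup (new_loc : List (Int × Int)) (hn : ¬ new_loc.Nodup) :
    bPairHit (fun i j => new_loc.getD i (0, 0) == new_loc.getD j (0, 0)) new_loc.length = true := by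
  rw [List.nodup_iff_getElem?_ne_getElem?] at hn
  push_neg at hn
  obtain ⟨i, j, hij, hj, he⟩ := hn
  rw [bPairHit_iff]
  refine ⟨i, j, hij, hj, ?_⟩
  rw [List.getElem?_eq_getElem hj, List.getElem?_eq_getElem (by omega)] at he
  rw [List.getD_eq_getElem _ _ (by omega), List.getD_eq_getElem _ _ hj, beq_iff_eq]
  injection he

theorem bSwap_iff_trig (old_loc new_loc : List (Int × Int)) :
    (bPairHit (fun i j => old_loc.getD i (0, 0) == new_loc.getD j (0, 0) &&
        old_loc.getD j (0, 0) == new_loc.getD i (0, 0))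
        (min old_loc.length new_loc.length) = true) ↔
      ∃ p ∈ PySem.List.enumerate old_loc, TrigP old_loc new_loc p := by
  rw [bPairHit_iff]
  constructor
  · rintro ⟨i, j, hij, hj, hf⟩
    have hio : i < old_loc.length := by omega
    have hin : i < new_loc.length := by omega
    have hjo : j < old_loc.length := by omega
    have hjn : j < new_loc.length := by omega
    rw [Bool.and_eq_true, List.getD_eq_getElem _ _ hio, List.getD_eq_getElem _ _ hjn,
        List.getD_eq_getElem _ _ hjo, List.getD_eq_getElem _ _ hin, beq_iff_eq, beq_iff_eq] at hf
    refine ⟨((i : Int), old_loc[i]),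
      (PySem.List.mem_enumerate_iff _ _ _).mpr ⟨i, hio, by simp⟩,
      ⟨i, j, hio, hjn, hjo, hin, rfl, hf.1.symm, by omega, hf.2⟩⟩
  · rintro ⟨p, hp, i, j, hi, hj, hji, hin, rfl, hnew, hij, hswap⟩
    rcases Nat.lt_or_ge i j with hlt | hge
    · refine ⟨i, j, hlt, by omega, ?_⟩
      rw [Bool.and_eq_true, List.getD_eq_getElem _ _ hi, List.getD_eq_getElem _ _ hj,
          List.getD_eq_getElem _ _ hji, List.getD_eq_getElem _ _ hin, beq_iff_eq, beq_iff_eq]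
      exact ⟨hnew.symm, hswap⟩
    · have hlt : j < i := by omega
      refine ⟨j, i, hlt, by omega, ?_⟩
      rw [Bool.and_eq_true, List.getD_eq_getElem _ _ hji, List.getD_eq_getElem _ _ hin,
          List.getD_eq_getElem _ _ hi, List.getD_eq_getElem _ _ hj, beq_iff_eq, beq_iff_eq]
      exact ⟨hswap, hnew.symm⟩

theorem is_valid_motion_equiv (old_loc new_loc : List (Int × Int))
    (hpre : Pre_is_valid_motion old_loc new_loc) :
    is_valid_motion old_loc new_loc = is_valid_motion_alt old_loc new_loc := by
  unfold is_valid_motion is_valid_motion_alt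
  by_cases hgate : (PySem.Set.ofList new_loc).length = new_loc.length
  · have hn := nodup_of_set_length _ hgate
    rw [if_neg (by rw [aDict_size, hgate]; simp)]
    simp only [bVertex_false_of_nodup new_loc hn, Bool.false_eq_true, if_false]
    have hmem : ∀ p ∈ PySem.List.enumerate old_loc,
        ∃ (k : Nat) (hk : k < old_loc.length), p = ((k : Int), old_loc[k]) := by
      intro p hp
      obtain ⟨k, hk, hpk⟩ := (PySem.List.mem_enumerate_iff _ _ _).mp hp
      exact ⟨k, hk, by simpa using hpk⟩
    by_cases hb : bPairHit (fun i j => old_loc.getD i (0, 0) == new_loc.getD j (0, 0) &&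
        old_loc.getD j (0, 0) == new_loc.getD i (0, 0))
        (min old_loc.length new_loc.length) = true
    · rw [hb, if_pos rfl]
      obtain ⟨p, hp, htrig⟩ := (bSwap_iff_trig old_loc new_loc).mp hb
      cases haL : aLoop old_loc new_loc (aDict new_loc) (PySem.List.enumerate old_loc) with
      | false => rfl
      | true =>
        exact absurd htrig (((aLoop_iff old_loc new_loc hn hpre _ hmem).mp haL) p hp)
    · rw [Bool.not_eq_true] at hb
      rw [hb]
      simp only [Bool.false_eq_true, if_false]
      rw [aLoop_iff old_loc new_loc hn hpre _ hmem]
      intro p hp htrig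
      exact (Bool.eq_false_iff.mp hb)
        ((bSwap_iff_trig old_loc new_loc).mpr ⟨p, hp, htrig⟩)
  · have hnn : ¬ new_loc.Nodup := fun h =>
      hgate (congrArg List.length (PySem.Set.ofList_eq_self_of_nodup new_loc h))
    rw [if_pos (by rw [aDict_size]; intro hc; exact hgate (by exact_mod_cast hc))]
    simp only [bVertex_true_of_not_nodup new_loc hnn, if_true]

-- ===== VERDICT (by name: the statement is the Claim_ definition above) =====
theorem is_valid_motion_spec : Claim_equal_is_valid_motion := by
  intro old_loc new_loc _ hpre
  unfold Spec_is_valid_motion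
  exact is_valid_motion_equiv old_loc new_loc hpre
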